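-- pv_equiv track=rewrite | github.com/Blueberry17/advent-of-code-2015 | src/day12/p2.py | account
-- ===== SOURCE A (Python) =====
-- def account(string):
--     total = 0
--     index = 0
--     previous = ""
--     neg = False
--     null = False
--     while index < len(string):
--         char = string[index]
--
--         if char == "{":
--             to_add, index_change = account(string[index+1:])
--             total += to_add
--             index += index_change
--         elif char == "}":
--             if previous.isdigit():
--                 if neg:
--                     total -= int(previous)
--                 else:
--                     total += int(previous)
--             if null:
--                 total = 0
--             return total, index+1
--
--         else:
--             if char.isdigit():
--                 previous += char
--             elif char == "-":
--                 neg = True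
--             elif index > 3 and string[index-4:index+1] == ":\"red":
--                 null = True
--             else:
--                 if previous.isdigit():
--                     if neg:
--                         total -= int(previous)
--                     else:
--                         total += int(previous)
--                     previous = ""
--                     neg = False
--
--         index += 1
--
--     return total, index
-- ===== SOURCE B (Python) =====
-- def account(string):
--     # One left-to-right pass with an explicit stack of suspended object frames,
--     # instead of A's recursion on sliced copies of the string.
--     n = len(string)
--     stack = []  # frames: (start, total, prev, neg, null)
--     start = 0
--     total = 0
--     prev = ""
--     neg = False
--     null = False
--     i = 0
--     while i < n:
--         c = string[i]
--         if c == "{":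
--             stack.append((start, total, prev, neg, null))
--             start, total, prev, neg, null = i + 1, 0, "", False, False
--         elif c == "}":
--             if prev.isdigit():
--                 total += -int(prev) if neg else int(prev)
--             if null:
--                 total = 0
--             if not stack:
--                 return total, i + 1
--             inner = total
--             start, total, prev, neg, null = stack.pop()
--             total += inner
--         elif c.isdigit():
--             prev += c
--         elif c == "-":
--             neg = True
--         elif i - start > 3 and string[i - 4:i + 1] == ':"red':
--             null = True
--         else:
--             if prev.isdigit():
--                 total += -int(prev) if neg else int(prev)
--                 prev = ""
--                 neg = False
--         i += 1
--     return total + sum(f[1] for f in stack), i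
-- ===== Notes on version B (the rewrite author's own statement) =====
-- stated objective: alternative
-- what changed: Replaced A's recursive descent, which calls itself on a fresh slice string[index+1:] at every opening brace, by a single left-to-right pass over the original string that keeps an explicit stack of suspended object frames (start, total, token, neg, null), so nothing is recomputed from slices.
import Mathlib
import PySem

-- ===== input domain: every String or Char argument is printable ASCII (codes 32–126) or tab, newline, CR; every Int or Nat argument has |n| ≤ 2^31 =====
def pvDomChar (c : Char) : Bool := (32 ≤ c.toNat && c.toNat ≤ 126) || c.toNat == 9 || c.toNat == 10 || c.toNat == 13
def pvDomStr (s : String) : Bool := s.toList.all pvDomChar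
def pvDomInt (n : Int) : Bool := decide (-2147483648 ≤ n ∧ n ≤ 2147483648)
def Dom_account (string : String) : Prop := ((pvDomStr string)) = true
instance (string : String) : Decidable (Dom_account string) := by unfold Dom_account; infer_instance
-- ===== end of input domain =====

-- B replaces A's recursion on sliced copies of the string by a single left-to-right
-- pass with an explicit stack of suspended object frames (objective: alternative).

-- termination helpers for the ports (cited by name in decreasing_by)
lemma pvDropLenLt (s : List Char) (index : Nat) (h : index < s.length) :
    (s.drop (index + 1)).length < s.length := by
  rw [List.length_drop]; omega

lemma pvSubLt (L i j : Nat) (h : i < L) (hj : i < j) : L - j < L - i := by omega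

-- ===== PORT A =====
-- Literal port of A: a while-loop over the (sliced) string that recurses on
-- string[index+1:] at every '{'.
def accountGo (s : List Char) (index : Nat) (total : Int) (previous : List Char)
    (neg null : Bool) : Int × Nat :=
  if h : index < s.length then
    let char := s[index]
    if char = '{' then
      -- to_add, index_change = account(string[index+1:]); total += to_add; index += index_change; index += 1
      let r := accountGo (s.drop (index + 1)) 0 0 [] false false
      accountGo s (index + r.2 + 1) (total + r.1) previous neg null
    else if char = '}' then
      let t1 := if PySem.Chars.strIsdigit previous then
          if neg then total - (PySem.Int.ofChars? previous).getD 0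
          else total + (PySem.Int.ofChars? previous).getD 0
        else total
      (if null then 0 else t1, index + 1)
    else if PySem.Chars.isdigit char then
      accountGo s (index + 1) total (previous ++ [char]) neg null
    else if char = '-' then
      accountGo s (index + 1) total previous true null
    else if 3 < index ∧ PySem.List.slice s (some ((index : Int) - 4)) (some ((index : Int) + 1))
        = [':', '"', 'r', 'e', 'd'] then
      accountGo s (index + 1) total previous neg true
    else if PySem.Chars.strIsdigit previous then
      accountGo s (index + 1)
        (if neg then total - (PySem.Int.ofChars? previous).getD 0
         else total + (PySem.Int.ofChars? previous).getD 0) [] false null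
    else
      accountGo s (index + 1) total previous neg null
  else (total, index)
termination_by (s.length, s.length - index)
decreasing_by
  · exact Prod.Lex.left _ _ (pvDropLenLt s index h)
  · exact Prod.Lex.right _ (pvSubLt s.length index (index + r.2 + 1) h (by omega))
  · exact Prod.Lex.right _ (pvSubLt s.length index (index + 1) h (Nat.lt_succ_self index))
  · exact Prod.Lex.right _ (pvSubLt s.length index (index + 1) h (Nat.lt_succ_self index))
  · exact Prod.Lex.right _ (pvSubLt s.length index (index + 1) h (Nat.lt_succ_self index))
  · exact Prod.Lex.right _ (pvSubLt s.length index (index + 1) h (Nat.lt_succ_self index))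
  · exact Prod.Lex.right _ (pvSubLt s.length index (index + 1) h (Nat.lt_succ_self index))

def account (string : String) : Int × Int :=
  let r := accountGo string.toList 0 0 [] false false
  (r.1, (r.2 : Int))

-- ===== PORT B =====
-- Literal port of B (Source B): one pass, index i only ever advances by 1; a '{' pushes
-- the current frame (start, total, prev, neg, null), a '}' pops it.
def accountAltGo (s : List Char) (i start : Nat)
    (stack : List (Nat × Int × List Char × Bool × Bool))
    (total : Int) (prev : List Char) (neg null : Bool) : Int × Nat :=
  if h : i < s.length then
    let c := s[i]
    if c = '{' then
      accountAltGo s (i + 1) (i + 1) ((start, total, prev, neg, null) :: stack) 0 [] false false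
    else if c = '}' then
      let t1 := if PySem.Chars.strIsdigit prev then
          total + (if neg then -((PySem.Int.ofChars? prev).getD 0)
                   else (PySem.Int.ofChars? prev).getD 0)
        else total
      let t2 := if null then 0 else t1
      match stack with
      | [] => (t2, i + 1)
      | (st, tot, pv, ng, nl) :: rest => accountAltGo s (i + 1) st rest (tot + t2) pv ng nl
    else if PySem.Chars.isdigit c then
      accountAltGo s (i + 1) start stack total (prev ++ [c]) neg null
    else if c = '-' then
      accountAltGo s (i + 1) start stack total prev true null
    else if 3 < i - start ∧ PySem.List.slice s (some ((i : Int) - 4)) (some ((i : Int) + 1))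
        = [':', '"', 'r', 'e', 'd'] then
      accountAltGo s (i + 1) start stack total prev neg true
    else if PySem.Chars.strIsdigit prev then
      accountAltGo s (i + 1) start stack
        (total + (if neg then -((PySem.Int.ofChars? prev).getD 0)
                  else (PySem.Int.ofChars? prev).getD 0)) [] false null
    else
      accountAltGo s (i + 1) start stack total prev neg null
  else (stack.foldl (fun a f => a + f.2.1) total, i)
termination_by s.length - i
decreasing_by all_goals exact pvSubLt s.length i (i + 1) h (Nat.lt_succ_self i)

def account_alt (string : String) : Int × Int :=
  let r := accountAltGo string.toList 0 0 [] 0 [] false false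
  (r.1, (r.2 : Int))

-- ===== PRECONDITION & SPEC =====
def Spec_account (string : String) (out : Int × Int) : Prop := out = account_alt string
instance (string : String) (out : Int × Int) : Decidable (Spec_account string out) := by unfold Spec_account; infer_instance

-- ===== CLAIM (what is proved, stated in full; the proofs are below) =====
def Claim_equal_account : Prop := ∀ (string : String), Dom_account string → Spec_account string (account string)

-- ===== LEMMAS AND PROOFS =====

-- A's suspended recursive calls, resumed: each frame (st, tot, pv, ng, nl) is a caller
-- of A whose loop resumes at absolute position j once the nested call finished with
-- first component t; results are kept as (total, absolute index).
def unwindA (s : List Char) : List (Nat × Int × List Char × Bool × Bool) → Int × Nat → Int × Nat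
  | [], r => r
  | (st, tot, pv, ng, nl) :: rest, (t, j) =>
      unwindA s rest ((accountGo (s.drop st) (j - st) (tot + t) pv ng nl).1,
                      st + (accountGo (s.drop st) (j - st) (tot + t) pv ng nl).2)

-- frame starts strictly decrease down the stack and sit below the current segment start
def StkOK : List (Nat × Int × List Char × Bool × Bool) → Nat → Prop
  | [], _ => True
  | (st, _, _, _, _) :: rest, bound => st < bound ∧ StkOK rest st

lemma accountGo_eof (s : List Char) (index : Nat) (total : Int) (previous : List Char)
    (neg null : Bool) (h : ¬ index < s.length) :
    accountGo s index total previous neg null = (total, index) := by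
  rw [accountGo]; simp [h]

lemma unwindA_eof (s : List Char) (stk : List (Nat × Int × List Char × Bool × Bool))
    (bound : Nat) (t : Int) (j : Nat) (hok : StkOK stk bound) (hbj : bound ≤ j)
    (hlen : s.length ≤ j) :
    unwindA s stk (t, j) = (stk.foldl (fun a f => a + f.2.1) t, j) := by
  induction stk generalizing bound t with
  | nil => rfl
  | cons f rest ih =>
      obtain ⟨st, tot, pv, ng, nl⟩ := f
      obtain ⟨hlt, hok'⟩ := hok
      rw [unwindA, accountGo_eof _ _ _ _ _ _ (by simp; omega)]
      simp only
      rw [show st + (j - st) = j by omega]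
      rw [ih st _ hok' (by omega)]
      simp only [List.foldl_cons]
      ring_nf

-- the two flush expressions compute the same total
lemma flush_eq (total v : Int) (neg : Bool) :
    (if neg then total - v else total + v) = total + (if neg then -v else v) := by
  cases neg <;> simp [sub_eq_add_neg]

-- the ':"red' test of A (relative to the slice) and of B (absolute, offset by start)
lemma red_eq (s : List Char) (start i : Nat) (hsi : start ≤ i) (_hi : i < s.length)
    (h3 : 3 < i - start) :
    PySem.List.slice (s.drop start) (some (((i - start : Nat) : Int) - 4))
        (some (((i - start : Nat) : Int) + 1))
      = PySem.List.slice s (some ((i : Int) - 4)) (some ((i : Int) + 1)) := by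
  rw [show ((i - start : Nat) : Int) - 4 = ((i - start - 4 : Nat) : Int) by omega,
      show ((i - start : Nat) : Int) + 1 = ((i - start + 1 : Nat) : Int) by omega,
      show ((i : Nat) : Int) - 4 = ((i - 4 : Nat) : Int) by omega,
      show ((i : Nat) : Int) + 1 = ((i + 1 : Nat) : Int) by omega,
      PySem.List.slice_natCast, PySem.List.slice_natCast, List.drop_drop]
  rw [show start + (i - start - 4) = i - 4 by omega,
      show i - start + 1 - (i - start - 4) = 5 by omega,
      show i + 1 - (i - 4) = 5 by omega]

lemma sim_eof (s : List Char) (i start : Nat)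
    (stk : List (Nat × Int × List Char × Bool × Bool)) (total : Int)
    (prev : List Char) (neg null : Bool)
    (hi : ¬ i < s.length) (hsi : start ≤ i) (hok : StkOK stk start) :
    accountAltGo s i start stk total prev neg null
      = unwindA s stk ((accountGo (s.drop start) (i - start) total prev neg null).1,
                       start + (accountGo (s.drop start) (i - start) total prev neg null).2) := by
  rw [accountAltGo]
  rw [dif_neg hi]
  rw [accountGo_eof _ _ _ _ _ _ (by simp; omega)]
  simp only
  rw [show start + (i - start) = i by omega]
  rw [unwindA_eof s stk start total i hok hsi (by omega)]

-- main simulation: B's explicit stack is exactly A's chain of suspended callers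
lemma main_sim (k : Nat) : ∀ (s : List Char) (i start : Nat)
    (stk : List (Nat × Int × List Char × Bool × Bool)) (total : Int)
    (prev : List Char) (neg null : Bool),
    s.length - i ≤ k → start ≤ i → StkOK stk start →
    accountAltGo s i start stk total prev neg null
      = unwindA s stk ((accountGo (s.drop start) (i - start) total prev neg null).1,
                       start + (accountGo (s.drop start) (i - start) total prev neg null).2) := by
  induction k with
  | zero =>
      intro s i start stk total prev neg null hk hsi hok
      exact sim_eof s i start stk total prev neg null (by omega) hsi hok
  | succ k ih =>
      intro s i start stk total prev neg null hk hsi hok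
      by_cases hi : i < s.length
      ·
          have hA : i - start < (s.drop start).length := by simp; omega
          have hchar : (s.drop start)[i - start]'hA = s[i]'hi := by
            rw [List.getElem_drop]
            congr 1
            omega
          rw [accountAltGo, dif_pos hi]
          conv_rhs => rw [accountGo, dif_pos hA]
          simp only [hchar]
          by_cases hb1 : s[i]'hi = '{'
          · simp only [if_pos hb1]
            rw [ih s (i+1) (i+1) _ 0 [] false false (by omega) (by omega) (by exact ⟨by omega, hok⟩)]
            simp only [Nat.sub_self]
            rw [unwindA]
            rw [List.drop_drop, show start + (i - start + 1) = i + 1 by omega,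
                show i + 1 + (accountGo (List.drop (i+1) s) 0 0 [] false false).2 - start
                   = i - start + (accountGo (List.drop (i+1) s) 0 0 [] false false).2 + 1 by omega]
          by_cases hb2 : s[i]'hi = '}'
          · simp only [if_neg hb1, if_pos hb2]
            cases stk with
            | nil =>
                simp only [unwindA]
                rw [show start + (i - start + 1) = i + 1 by omega, flush_eq]
            | cons f rest =>
                obtain ⟨st, tot, pv, ng, nl⟩ := f
                obtain ⟨hlt, hok'⟩ := hok
                simp only []
                rw [ih s (i+1) st rest _ pv ng nl (by omega) (by omega) hok']
                simp only [unwindA]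
                rw [show start + (i - start + 1) = i + 1 by omega, flush_eq]
          · -- remaining single-step branches
            simp only [if_neg hb1, if_neg hb2]
            have hcond : (3 < i - start ∧
                PySem.List.slice (List.drop start s) (some (((i - start : Nat) : Int) - 4))
                  (some (((i - start : Nat) : Int) + 1)) = [':', '"', 'r', 'e', 'd'])
                ↔ (3 < i - start ∧
                PySem.List.slice s (some ((i : Int) - 4)) (some ((i : Int) + 1)) = [':', '"', 'r', 'e', 'd']) := by
              constructor
              · rintro ⟨h3, hsl⟩
                exact ⟨h3, by rw [← red_eq s start i hsi hi h3]; exact hsl⟩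
              · rintro ⟨h3, hsl⟩
                exact ⟨h3, by rw [red_eq s start i hsi hi h3]; exact hsl⟩
            simp only [hcond]
            have hstep : ∀ (total' : Int) (prev' : List Char) (neg' null' : Bool),
                accountAltGo s (i + 1) start stk total' prev' neg' null'
                  = unwindA s stk
                      ((accountGo (List.drop start s) (i - start + 1) total' prev' neg' null').1,
                        start + (accountGo (List.drop start s) (i - start + 1) total' prev' neg' null').2) := by
              intro total' prev' neg' null'
              rw [ih s (i+1) start stk total' prev' neg' null' (by omega) (by omega) hok]
              rw [show i + 1 - start = i - start + 1 by omega]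
            by_cases hb3 : PySem.Chars.isdigit (s[i]'hi) = true
            · simp only [if_pos hb3, hstep]
            · simp only [if_neg hb3]
              by_cases hb4 : s[i]'hi = '-'
              · simp only [if_pos hb4, hstep]
              · simp only [if_neg hb4]
                by_cases hb5 : (3 < i - start ∧
                    PySem.List.slice s (some ((i : Int) - 4)) (some ((i : Int) + 1)) = [':', '"', 'r', 'e', 'd'])
                · simp only [if_pos hb5, hstep]
                · simp only [if_neg hb5]
                  by_cases hb6 : PySem.Chars.strIsdigit prev = true
                  · simp only [if_pos hb6, hstep, flush_eq]
                  · simp only [if_neg hb6, hstep]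
      · exact sim_eof s i start stk total prev neg null hi hsi hok

-- ===== VERDICT (by name: the statement is the Claim_ definition above) =====
theorem account_spec : Claim_equal_account := by
  intro s _
  unfold Spec_account account account_alt
  have h := main_sim s.toList.length s.toList 0 0 [] 0 [] false false
    (by omega) (by omega) trivial
  simp only [List.drop_zero, Nat.sub_zero, Nat.zero_add, unwindA] at h
  rw [h]
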